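-- pv_equiv track=rewrite | github.com/izcoser/cp | leetcode/17. Letter Combinations of a Phone Number.py | combine_four
-- ===== SOURCE A (Python) =====
-- from typing import List
--
-- def combine_four(s1: str, s2: str, s3: str, s4: str) -> List[str]:
--     combs = []
--     for i in s1:
--         for j in s2:
--             for k in s3:
--                 for w in s4:
--                     combs.append(i + j + k + w)
--     return combs
-- ===== SOURCE B (Python) =====
-- from typing import List
--
-- def combine_four(s1: str, s2: str, s3: str, s4: str) -> List[str]:
--     combs = [""]
--     for s in (s1, s2, s3, s4):
--         combs = [prefix + c for prefix in combs for c in s]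
--     return combs
-- ===== Notes on version B (the rewrite author's own statement) =====
-- stated objective: simpler
-- what changed: Replaces the four hardcoded nested loops with a single fold over the list of input strings that grows a list of prefixes, yielding the same order because earlier strings vary slower.
import Mathlib
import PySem

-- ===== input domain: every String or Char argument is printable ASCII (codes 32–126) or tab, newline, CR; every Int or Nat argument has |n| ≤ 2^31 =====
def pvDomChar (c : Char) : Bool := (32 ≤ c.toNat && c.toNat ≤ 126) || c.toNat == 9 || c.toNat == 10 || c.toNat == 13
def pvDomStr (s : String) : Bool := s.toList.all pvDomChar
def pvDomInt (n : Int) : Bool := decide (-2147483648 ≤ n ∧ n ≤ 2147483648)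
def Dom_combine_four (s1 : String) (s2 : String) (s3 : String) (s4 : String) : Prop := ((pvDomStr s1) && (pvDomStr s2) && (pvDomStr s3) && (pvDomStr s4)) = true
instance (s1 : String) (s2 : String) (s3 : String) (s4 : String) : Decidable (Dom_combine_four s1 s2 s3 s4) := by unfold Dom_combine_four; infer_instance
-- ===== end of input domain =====

-- ===== PORT A =====
-- Header: B builds the product by folding a growing pre list over the four strings
-- instead of four hardcoded nested loops ("simpler"); same order, same results.
def combine_four (s1 : String) (s2 : String) (s3 : String) (s4 : String) : List String :=
  s1.toList.foldl (fun combs i =>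
    s2.toList.foldl (fun combs j =>
      s3.toList.foldl (fun combs k =>
        s4.toList.foldl (fun combs w =>
          combs ++ [i.toString ++ j.toString ++ k.toString ++ w.toString]) combs) combs) combs) []

-- ===== PORT B =====
def combine_four_alt (s1 : String) (s2 : String) (s3 : String) (s4 : String) : List String :=
  [s1, s2, s3, s4].foldl
    (fun combs s => combs.flatMap (fun pre => s.toList.map (fun c => pre ++ c.toString)))
    [""]

-- ===== PRECONDITION & SPEC =====
def Spec_combine_four (s1 : String) (s2 : String) (s3 : String) (s4 : String) (out : List String) : Prop := out = combine_four_alt s1 s2 s3 s4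
instance (s1 : String) (s2 : String) (s3 : String) (s4 : String) (out : List String) : Decidable (Spec_combine_four s1 s2 s3 s4 out) := by unfold Spec_combine_four; infer_instance

-- ===== CLAIM (what is proved, stated in full; the proofs are below) =====
def Claim_equal_combine_four : Prop := ∀ (s1 : String) (s2 : String) (s3 : String) (s4 : String), Dom_combine_four s1 s2 s3 s4 → Spec_combine_four s1 s2 s3 s4 (combine_four s1 s2 s3 s4)

-- ===== LEMMAS AND PROOFS =====

-- A fold that only appends to its accumulator is the accumulator followed by a flatMap.
theorem pv_foldl_append (l : List α) (g : α → List β) (acc : List β) :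
    l.foldl (fun a x => a ++ g x) acc = acc ++ l.flatMap g := by
  induction l generalizing acc with
  | nil => simp
  | cons x xs ih => simp [List.foldl_cons, ih, List.append_assoc]

theorem combine_four_spec : Claim_equal_combine_four := by
  intro s1 s2 s3 s4 _
  unfold Spec_combine_four combine_four combine_four_alt
  simp only [List.foldl_cons, List.foldl_nil]
  have h4 : ∀ (i j k : Char) (combs : List String),
      s4.toList.foldl (fun combs w => combs ++ [i.toString ++ j.toString ++ k.toString ++ w.toString]) combs
        = combs ++ s4.toList.map (fun w => i.toString ++ j.toString ++ k.toString ++ w.toString) := by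
    intro i j k combs
    rw [pv_foldl_append]
    induction s4.toList with
    | nil => simp
    | cons x xs ih => simpa using ih
  simp only [h4]
  have h3 : ∀ (i j : Char) (combs : List String),
      s3.toList.foldl (fun combs k =>
          combs ++ s4.toList.map (fun w => i.toString ++ j.toString ++ k.toString ++ w.toString)) combs
        = combs ++ s3.toList.flatMap (fun k =>
            s4.toList.map (fun w => i.toString ++ j.toString ++ k.toString ++ w.toString)) := by
    intro i j combs
    exact pv_foldl_append _ _ _
  simp only [h3]
  have h2 : ∀ (i : Char) (combs : List String),
      s2.toList.foldl (fun combs j =>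
          combs ++ s3.toList.flatMap (fun k =>
            s4.toList.map (fun w => i.toString ++ j.toString ++ k.toString ++ w.toString))) combs
        = combs ++ s2.toList.flatMap (fun j =>
            s3.toList.flatMap (fun k =>
              s4.toList.map (fun w => i.toString ++ j.toString ++ k.toString ++ w.toString))) := by
    intro i combs
    exact pv_foldl_append _ _ _
  simp only [h2]
  rw [pv_foldl_append]
  simp only [List.nil_append, List.flatMap_cons, List.flatMap_nil, List.append_nil,
    List.flatMap_map, List.flatMap_assoc]
  simp [String.singleton]
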